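-- pv_equiv track=rewrite | github.com/rakytap/sequential-quantum-gate-decomposer | squander/synthesis/PartAM_utils.py | get_canonical_form
-- ===== SOURCE A (Python) =====
-- from typing import List, Tuple, Set, FrozenSet
-- from itertools import permutations
--
-- def get_canonical_form(qubit_subset: Set[int], induced_edges: List[Tuple[int, int]]) -> FrozenSet[Tuple[int, int]]:
--     qubits = sorted(qubit_subset)
--     n = len(qubits)
--     best_edges = None
--     for perm in permutations(range(n)):
--         mapping = {qubits[i]: perm[i] for i in range(n)}
--         relabeled = tuple(sorted([tuple(sorted([mapping[u], mapping[v]])) for u, v in induced_edges]))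
--         if best_edges is None or relabeled < best_edges:
--             best_edges = relabeled
--     return frozenset(best_edges)
-- ===== SOURCE B (Python) =====
-- def get_canonical_form(qubit_subset, induced_edges):
--     qubits = sorted(qubit_subset)
--     n = len(qubits)
--     idx = {}
--     for i, q in enumerate(qubits):
--         idx[q] = i
--     e_idx = [(idx[u], idx[v]) for u, v in induced_edges]
--
--     def go(perm, remaining, best):
--         if not remaining:
--             cand = sorted(tuple(sorted((perm[a], perm[b]))) for a, b in e_idx)
--             if best is None or cand < best:
--                 return cand
--             return best
--         for k in range(len(remaining)):
--             best = go(perm + [remaining[k]], remaining[:k] + remaining[k + 1:], best)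
--         return best
--
--     best = go([], list(range(n)), None)
--     return frozenset(best)
-- ===== Notes on version B (the rewrite author's own statement) =====
-- stated objective: alternative
-- what changed: Replaces the flat itertools.permutations scan that rebuilds a qubit->label dict for every permutation with a one-time qubit->index table, index-translated edges, and a recursive backtracking enumeration that threads the running lexicographic minimum through the recursion.
import Mathlib
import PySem

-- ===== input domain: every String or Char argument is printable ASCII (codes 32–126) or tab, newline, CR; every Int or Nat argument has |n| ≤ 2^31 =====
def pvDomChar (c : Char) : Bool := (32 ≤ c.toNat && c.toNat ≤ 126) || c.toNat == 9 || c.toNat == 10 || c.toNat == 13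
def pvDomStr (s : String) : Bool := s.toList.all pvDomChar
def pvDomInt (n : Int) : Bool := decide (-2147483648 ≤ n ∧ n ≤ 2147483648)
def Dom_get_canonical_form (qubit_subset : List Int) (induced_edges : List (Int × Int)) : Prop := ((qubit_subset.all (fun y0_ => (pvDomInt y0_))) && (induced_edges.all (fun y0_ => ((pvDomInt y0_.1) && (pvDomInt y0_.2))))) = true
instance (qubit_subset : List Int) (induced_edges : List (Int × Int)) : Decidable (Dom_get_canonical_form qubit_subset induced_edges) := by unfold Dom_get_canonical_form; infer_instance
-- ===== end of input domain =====

-- B replaces A's flat permutations scan (fresh dict per permutation) by a one-time qubit->index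
-- table plus a recursive backtracking enumeration threading the running lexicographic minimum
-- (objective: alternative); proved equal on inputs whose edge endpoints all lie in the subset.


-- common helpers: ports of Python's 'tuple(sorted([x, y]))' and of '<' on lists of int pairs,
-- and of the shared 'if best is None or cand < best' update (identical lines in both Pythons)
def pairMin (x y : Int) : Int × Int := if y < x then (y, x) else (x, y)

def pLt (p q : Int × Int) : Bool := decide (p.1 < q.1 ∨ (p.1 = q.1 ∧ p.2 < q.2))

def lexLt : List (Int × Int) → List (Int × Int) → Bool
  | _, [] => false
  | [], _ :: _ => true
  | a :: as, b :: bs => pLt a b || (a == b && lexLt as bs)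

def step (best : Option (List (Int × Int))) (cand : List (Int × Int)) : Option (List (Int × Int)) :=
  match best with
  | none => some cand
  | some b => if lexLt cand b then some cand else some b

-- ===== PORT A =====
def get_canonical_form (qubit_subset : List Int) (induced_edges : List (Int × Int)) : List (Int × Int) :=
  let qubits := PySem.List.sorted qubit_subset (fun x => x)
  let n := qubits.length
  let best := (PySem.List.permutations (PySem.List.pyRange 0 (n : Int) 1) n).foldl
    (fun best perm =>
      -- mapping = {qubits[i]: perm[i] for i in range(n)}
      let mapping := (qubits.zip perm).foldl (fun d p => d.insert p.1 p.2) PySem.Dict.empty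
      let relabeled := PySem.List.sorted2 (induced_edges.map (fun e =>
        pairMin ((mapping.get? e.1).getD 0) ((mapping.get? e.2).getD 0)))
        (fun x => x.1) (fun x => x.2)
      step best relabeled) none
  PySem.Set.ofList (best.getD [])

-- ===== PORT B =====
-- splits(l) = [(l[:k], l[k], l[k+1:]) for k in range(len(l))]
def splits : List Int → List (List Int × Int × List Int)
  | [] => []
  | x :: xs => ([], x, xs) :: (splits xs).map (fun t => (x :: t.1, t.2.1, t.2.2))

theorem splits_length {l : List Int} {t : List Int × Int × List Int} (h : t ∈ splits l) :
    t.1.length + t.2.2.length + 1 = l.length := by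
  induction l generalizing t with
  | nil => simp [splits] at h
  | cons x xs ih =>
    simp only [splits, List.mem_cons, List.mem_map] at h
    rcases h with h | ⟨u, hu, rfl⟩
    · subst h; simp
    · have := ih hu; simp; omega

def go (eIdx : List (Int × Int)) :
    List Int → List Int → Option (List (Int × Int)) → Option (List (Int × Int))
  | perm, [], best =>
    step best (PySem.List.sorted2 (eIdx.map (fun e =>
      pairMin (PySem.List.pyGetD perm e.1 0) (PySem.List.pyGetD perm e.2 0)))
      (fun x => x.1) (fun x => x.2))
  | perm, x :: xs, best =>
    (splits (x :: xs)).attach.foldl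
      (fun b t => go eIdx (perm ++ [t.1.2.1]) (t.1.1 ++ t.1.2.2) b) best
termination_by _ remaining _ => remaining.length
decreasing_by
  have h := splits_length t.2
  simp only [List.length_append, List.length_cons] at h ⊢
  omega

def get_canonical_form_alt (qubit_subset : List Int) (induced_edges : List (Int × Int)) : List (Int × Int) :=
  let qubits := PySem.List.sorted qubit_subset (fun x => x)
  let n := qubits.length
  let idx := (PySem.List.enumerate qubits).foldl (fun d p => d.insert p.2 p.1) PySem.Dict.empty
  let eIdx := induced_edges.map (fun e => ((idx.get? e.1).getD 0, (idx.get? e.2).getD 0))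
  let best := go eIdx [] (PySem.List.pyRange 0 (n : Int) 1) none
  PySem.Set.ofList (best.getD [])

-- ===== PRECONDITION & SPEC =====
-- Pre_ excludes exactly the inputs where the Python A raises KeyError: an edge endpoint
-- that is not a member of qubit_subset (mapping[u]); B raises KeyError there too.
def Pre_get_canonical_form (qubit_subset : List Int) (induced_edges : List (Int × Int)) : Prop :=
  ∀ e ∈ induced_edges, e.1 ∈ qubit_subset ∧ e.2 ∈ qubit_subset
instance (qubit_subset : List Int) (induced_edges : List (Int × Int)) : Decidable (Pre_get_canonical_form qubit_subset induced_edges) := by unfold Pre_get_canonical_form; infer_instance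
def pvWitness_get_canonical_form : List Int × (List (Int × Int)) := ([0, 1, 2], [(0, 1), (2, 1)])

def Spec_get_canonical_form (qubit_subset : List Int) (induced_edges : List (Int × Int)) (out : List (Int × Int)) : Prop := out = get_canonical_form_alt qubit_subset induced_edges
instance (qubit_subset : List Int) (induced_edges : List (Int × Int)) (out : List (Int × Int)) : Decidable (Spec_get_canonical_form qubit_subset induced_edges out) := by unfold Spec_get_canonical_form; infer_instance

-- ===== CLAIM (what is proved, stated in full; the proofs are below) =====
def Claim_equal_get_canonical_form : Prop := ∀ (qubit_subset : List Int) (induced_edges : List (Int × Int)), Dom_get_canonical_form qubit_subset induced_edges → Pre_get_canonical_form qubit_subset induced_edges → Spec_get_canonical_form qubit_subset induced_edges (get_canonical_form qubit_subset induced_edges)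

-- ===== LEMMAS AND PROOFS =====

-- lex-order facts
theorem lexLt_irrefl (a : List (Int × Int)) : lexLt a a = false := by
  induction a with
  | nil => rfl
  | cons x xs ih => simp [lexLt, pLt, ih]

theorem lexLt_asymm {a b : List (Int × Int)} (h : lexLt a b = true) : lexLt b a = false := by
  induction a generalizing b with
  | nil => cases b <;> simp [lexLt]
  | cons x xs ih =>
    cases b with
    | nil => simp [lexLt] at h
    | cons y ys =>
      obtain ⟨x1, x2⟩ := x
      obtain ⟨y1, y2⟩ := y
      simp only [lexLt, pLt, Bool.or_eq_true, Bool.and_eq_true, beq_iff_eq,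
        decide_eq_true_eq, Prod.mk.injEq] at h
      simp only [lexLt, pLt, Bool.or_eq_false_iff, Bool.and_eq_false_iff,
        decide_eq_false_iff_not, beq_eq_false_iff_ne, ne_eq, Prod.mk.injEq, not_and, not_or]
      rcases h with h | ⟨⟨rfl, rfl⟩, h⟩
      · exact ⟨by omega, Or.inl (by omega)⟩
      · exact ⟨by omega, Or.inr (ih h)⟩

theorem lexLt_conn {a b : List (Int × Int)} (hab : lexLt a b = false) (hba : lexLt b a = false) :
    a = b := by
  induction a generalizing b with
  | nil =>
    cases b with
    | nil => rfl
    | cons y ys => simp [lexLt] at hab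
  | cons x xs ih =>
    cases b with
    | nil => simp [lexLt] at hba
    | cons y ys =>
      obtain ⟨x1, x2⟩ := x
      obtain ⟨y1, y2⟩ := y
      simp only [lexLt, pLt, Bool.or_eq_false_iff, Bool.and_eq_false_iff,
        decide_eq_false_iff_not, beq_eq_false_iff_ne, ne_eq, Prod.mk.injEq, not_and,
        not_or] at hab hba
      obtain ⟨h1, h2⟩ := hab
      obtain ⟨h3, h4⟩ := hba
      have e1 : x1 = y1 := by omega
      have e2 : x2 = y2 := by omega
      subst e1; subst e2
      rcases h2 with h2 | h2
      · exact absurd rfl (h2 rfl)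
      rcases h4 with h4 | h4
      · exact absurd rfl (h4 rfl)
      exact congrArg _ (ih h2 h4)

theorem lexLt_neg_trans {a b c : List (Int × Int)} (h1 : lexLt b a = false)
    (h2 : lexLt c b = false) : lexLt c a = false := by
  induction a generalizing b c with
  | nil => cases c <;> rfl
  | cons x xs ih =>
    cases b with
    | nil => simp [lexLt] at h1
    | cons y ys =>
      cases c with
      | nil => simp [lexLt] at h2
      | cons z zs =>
        obtain ⟨x1, x2⟩ := x; obtain ⟨y1, y2⟩ := y; obtain ⟨z1, z2⟩ := z
        simp only [lexLt, pLt, Bool.or_eq_false_iff, Bool.and_eq_false_iff,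
          decide_eq_false_iff_not, beq_eq_false_iff_ne, ne_eq, Prod.mk.injEq, not_and,
          not_or] at h1 h2 ⊢
        obtain ⟨p1, q1⟩ := h1
        obtain ⟨p2, q2⟩ := h2
        refine ⟨by omega, ?_⟩
        by_cases hz : z1 = x1 ∧ z2 = x2
        · obtain ⟨rfl, rfl⟩ := hz
          have e1 : y1 = z1 := by omega
          have e2 : y2 = z2 := by omega
          subst e1; subst e2
          rcases q1 with q1 | q1
          · exact absurd rfl (q1 rfl)
          rcases q2 with q2 | q2
          · exact absurd rfl (q2 rfl)
          exact Or.inr (ih q1 q2)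
        · exact Or.inl (fun h1 h2 => hz ⟨h1, h2⟩)

-- step / fold-min facts
theorem step_spec (b0 : Option (List (Int × Int))) (v : List (Int × Int)) :
    ∃ m0, step b0 v = some m0 ∧ (m0 = v ∨ b0 = some m0) ∧ lexLt v m0 = false ∧
      (∀ b, b0 = some b → lexLt b m0 = false) := by
  cases b0 with
  | none => exact ⟨v, rfl, Or.inl rfl, lexLt_irrefl v, by simp⟩
  | some b =>
    by_cases h : lexLt v b = true
    · exact ⟨v, by simp [step, h], Or.inl rfl, lexLt_irrefl v,
        fun b' hb' => by cases hb'; exact lexLt_asymm h⟩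
    · refine ⟨b, by simp [step, h], Or.inr rfl, by simpa using h,
        fun b' hb' => by cases hb'; exact lexLt_irrefl b⟩

theorem foldl_step_spec (l : List (List (Int × Int))) (b0 : Option (List (Int × Int))) :
    (l.foldl step b0 = b0 ∨ ∃ m ∈ l, l.foldl step b0 = some m) ∧
    (∀ v ∈ l, ∀ m, l.foldl step b0 = some m → lexLt v m = false) ∧
    (∀ b, b0 = some b → ∀ m, l.foldl step b0 = some m → lexLt b m = false) := by
  induction l generalizing b0 with
  | nil =>
    refine ⟨Or.inl rfl, by simp, ?_⟩
    rintro b rfl m hm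
    cases hm
    exact lexLt_irrefl b
  | cons v l ih =>
    obtain ⟨m0, hs, horig, hvm0, hbm0⟩ := step_spec b0 v
    have hfold : (v :: l).foldl step b0 = l.foldl step (some m0) := by
      simp [List.foldl_cons, hs]
    obtain ⟨ih1, ih2, ih3⟩ := ih (some m0)
    refine ⟨?_, ?_, ?_⟩
    · rcases ih1 with h | ⟨m, hm, he⟩
      · rcases horig with rfl | hb0
        · exact Or.inr ⟨m0, List.mem_cons_self, by rw [hfold, h]⟩
        · exact Or.inl (by rw [hfold, h, hb0])
      · exact Or.inr ⟨m, List.mem_cons_of_mem _ hm, by rw [hfold, he]⟩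
    · intro v' hv' m hm
      rw [hfold] at hm
      have hm0m : lexLt m0 m = false := ih3 m0 rfl m hm
      rcases List.mem_cons.mp hv' with rfl | hv'
      · exact lexLt_neg_trans hm0m hvm0
      · exact ih2 v' hv' m hm
    · rintro b rfl m hm
      rw [hfold] at hm
      exact lexLt_neg_trans (ih3 m0 rfl m hm) (hbm0 b rfl)

-- dict-as-last-association characterisation
def lastAssoc {V : Type} : List (Int × V) → Int → Option V
  | [], _ => none
  | p :: rest, u => (lastAssoc rest u).or (if p.1 = u then some p.2 else none)

def lastIdx : List Int → Int → Option Nat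
  | [], _ => none
  | k :: ks, u => ((lastIdx ks u).map (· + 1)).or (if k = u then some 0 else none)

theorem foldl_insert_get? {V : Type} (pairs : List (Int × V)) (d : PySem.Dict Int V) (u : Int) :
    (pairs.foldl (fun d p => d.insert p.1 p.2) d).get? u = (lastAssoc pairs u).or (d.get? u) := by
  induction pairs generalizing d with
  | nil => simp [lastAssoc]
  | cons p rest ih =>
    rw [List.foldl_cons, ih, PySem.Dict.get?_insert]
    simp only [lastAssoc]
    cases h : lastAssoc rest u with
    | some v => simp
    | none =>
      by_cases hpu : p.1 = u
      · subst hpu; simp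
      · have hup : ¬ (u = p.1) := fun e => hpu e.symm
        simp [hpu, hup]

theorem lastAssoc_zip (ks vs : List Int) (h : ks.length = vs.length) (u : Int) :
    lastAssoc (ks.zip vs) u = (lastIdx ks u).map (fun j => vs.getD j 0) := by
  induction ks generalizing vs with
  | nil => simp [lastAssoc, lastIdx]
  | cons k ks ih =>
    cases vs with
    | nil => simp at h
    | cons v vs =>
      have h' : ks.length = vs.length := by simpa using h
      simp only [List.zip_cons_cons, lastAssoc, lastIdx, ih vs h']
      cases hj : lastIdx ks u with
      | some j => simp
      | none => by_cases hk : k = u <;> simp [hk]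

theorem lastAssoc_enum (ks : List Int) (s : Int) (u : Int) :
    lastAssoc ((PySem.List.enumerate ks s).map (fun p => (p.2, p.1))) u
      = (lastIdx ks u).map (fun j => s + (j : Int)) := by
  induction ks generalizing s with
  | nil => simp [PySem.List.enumerate_nil, lastAssoc, lastIdx]
  | cons k ks ih =>
    rw [PySem.List.enumerate_cons]
    simp only [List.map_cons, lastAssoc, lastIdx, ih (s + 1)]
    cases hj : lastIdx ks u with
    | some j => simp; omega
    | none => by_cases hk : k = u <;> simp [hk]

theorem lastIdx_isSome {ks : List Int} {u : Int} (h : u ∈ ks) : ∃ j, lastIdx ks u = some j := by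
  induction ks with
  | nil => simp at h
  | cons k ks ih =>
    simp only [lastIdx]
    cases hj : lastIdx ks u with
    | some j => exact ⟨j + 1, rfl⟩
    | none =>
      rcases List.mem_cons.mp h with rfl | hm
      · simp
      · obtain ⟨j, hj'⟩ := ih hm
        rw [hj'] at hj
        cases hj

-- the two lookup pipelines agree
theorem lookup_eq (qubits vs : List Int) (h : qubits.length = vs.length) (u : Int)
    (hu : u ∈ qubits) :
    (((qubits.zip vs).foldl (fun d p => d.insert p.1 p.2) PySem.Dict.empty).get? u).getD 0
      = PySem.List.pyGetD vs
          ((((PySem.List.enumerate qubits).foldl (fun d p => d.insert p.2 p.1)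
              PySem.Dict.empty).get? u).getD 0) 0 := by
  obtain ⟨j, hj⟩ := lastIdx_isSome hu
  have hA := foldl_insert_get? (qubits.zip vs) (PySem.Dict.empty (κ := Int) (ν := Int)) u
  rw [lastAssoc_zip qubits vs h u, hj] at hA
  have hB : ((PySem.List.enumerate qubits).foldl (fun d p => d.insert p.2 p.1)
      PySem.Dict.empty).get? u = some ((0 : Int) + (j : Int)) := by
    have hm : ((PySem.List.enumerate qubits 0).map (fun p => (p.2, p.1))).foldl
        (fun d p => d.insert p.1 p.2) (PySem.Dict.empty (κ := Int) (ν := Int))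
        = (PySem.List.enumerate qubits 0).foldl (fun d p => d.insert p.2 p.1)
            PySem.Dict.empty := List.foldl_map
    have := foldl_insert_get? ((PySem.List.enumerate qubits 0).map (fun p => (p.2, p.1)))
      (PySem.Dict.empty (κ := Int) (ν := Int)) u
    rw [lastAssoc_enum qubits 0 u, hj, hm] at this
    simpa using this
  rw [hB]
  simp only [Option.getD_some, zero_add, PySem.List.pyGetD_natCast]
  simp [hA]

-- splits facts
theorem splits_sound {l : List Int} {t : List Int × Int × List Int} (h : t ∈ splits l) :
    l = t.1 ++ t.2.1 :: t.2.2 := by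
  induction l generalizing t with
  | nil => simp [splits] at h
  | cons x xs ih =>
    simp only [splits, List.mem_cons, List.mem_map] at h
    rcases h with rfl | ⟨u, hu, rfl⟩
    · rfl
    · simpa using congrArg (x :: ·) (ih hu)

theorem splits_complete {l pre post : List Int} {x : Int} (h : l = pre ++ x :: post) :
    (pre, x, post) ∈ splits l := by
  induction pre generalizing l with
  | nil => subst h; simp [splits, List.nil_append]
  | cons y pre ih =>
    subst h
    simp only [List.cons_append, splits, List.mem_cons, List.mem_map]
    exact Or.inr ⟨(pre, x, post), ih rfl, rfl⟩

theorem cons_perm_iff_splits {l p : List Int} {x : Int} :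
    (x :: p).Perm l ↔ ∃ t ∈ splits l, x = t.2.1 ∧ p.Perm (t.1 ++ t.2.2) := by
  constructor
  · intro h
    have hx : x ∈ l := h.subset List.mem_cons_self
    obtain ⟨s, t', rfl⟩ := List.append_of_mem hx
    refine ⟨(s, x, t'), splits_complete rfl, rfl, ?_⟩
    exact (h.trans List.perm_middle).cons_inv
  · rintro ⟨t, ht, rfl, hp⟩
    have hl := splits_sound ht
    rw [hl]
    exact (hp.cons t.2.1).trans List.perm_middle.symm

-- permutations completeness
theorem perms_complete {p xs : List Int} (h : p.Perm xs) :
    p ∈ PySem.List.permutations xs xs.length := by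
  induction p generalizing xs with
  | nil =>
    have : xs = [] := h.symm.eq_nil
    subst this
    show [] ∈ PySem.List.permutations [] 0
    rw [PySem.List.permutations_zero]
    simp
  | cons x p ih =>
    have hlen : xs.length = p.length + 1 := by simpa using h.length_eq.symm
    rw [hlen, PySem.List.permutations]
    have hx : x ∈ xs := h.subset List.mem_cons_self
    obtain ⟨i, hi, hxi⟩ := List.mem_iff_getElem.mp hx
    have hperm : p.Perm (xs.eraseIdx i) := by
      have h2 := h.trans (List.getElem_cons_eraseIdx_perm hi).symm
      rw [hxi] at h2
      exact h2.cons_inv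
    have hmem : p ∈ PySem.List.permutations (xs.eraseIdx i) (xs.eraseIdx i).length := ih hperm
    have hlen' : (xs.eraseIdx i).length = p.length := by
      rw [List.length_eraseIdx_of_lt hi, hlen]
      omega
    simp only [List.mem_flatMap]
    refine ⟨i, by simpa using hi, ?_⟩
    rw [List.getElem?_eq_getElem hi, hxi]
    simp only [List.mem_map]
    exact ⟨p, by rwa [hlen'] at hmem, rfl⟩

-- the leaf value of B's recursion
def gv (eIdx : List (Int × Int)) (perm : List Int) : List (Int × Int) :=
  PySem.List.sorted2 (eIdx.map (fun e =>
    pairMin (PySem.List.pyGetD perm e.1 0) (PySem.List.pyGetD perm e.2 0)))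
    (fun x => x.1) (fun x => x.2)

theorem go_nil_spec (eIdx : List (Int × Int)) (perm : List Int)
    (best : Option (List (Int × Int))) :
    ∃ m, go eIdx perm [] best = some m ∧
      ((∃ p, p.Perm ([] : List Int) ∧ m = gv eIdx (perm ++ p)) ∨ best = some m) ∧
      (∀ p, p.Perm ([] : List Int) → lexLt (gv eIdx (perm ++ p)) m = false) ∧
      (∀ b, best = some b → lexLt b m = false) := by
  obtain ⟨m0, hs, horig, hv, hb⟩ := step_spec best (gv eIdx perm)
  refine ⟨m0, by simpa [go, gv] using hs, ?_, ?_, hb⟩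
  · rcases horig with rfl | h
    · exact Or.inl ⟨[], List.Perm.refl _, by simp⟩
    · exact Or.inr h
  · intro p hp
    have : p = [] := hp.eq_nil
    subst this
    simpa using hv

theorem go_cons_eq (eIdx : List (Int × Int)) (perm : List Int) (x : Int) (xs : List Int)
    (best : Option (List (Int × Int))) :
    go eIdx perm (x :: xs) best = (splits (x :: xs)).foldl
      (fun b t => go eIdx (perm ++ [t.2.1]) (t.1 ++ t.2.2) b) best := by
  rw [go]
  exact List.foldl_attach (l := splits (x :: xs))
    (f := fun b v => go eIdx (perm ++ [v.2.1]) (v.1 ++ v.2.2) b) (b := best)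

theorem go_fold_spec (eIdx : List (Int × Int)) (perm : List Int) (n : Nat)
    (IH : ∀ (remaining' perm' : List Int) (best' : Option (List (Int × Int))),
      remaining'.length ≤ n →
      ∃ m, go eIdx perm' remaining' best' = some m ∧
        ((∃ p, p.Perm remaining' ∧ m = gv eIdx (perm' ++ p)) ∨ best' = some m) ∧
        (∀ p, p.Perm remaining' → lexLt (gv eIdx (perm' ++ p)) m = false) ∧
        (∀ b, best' = some b → lexLt b m = false))
    (ts : List (List Int × Int × List Int))
    (hts : ∀ t ∈ ts, (t.1 ++ t.2.2).length ≤ n) :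
    ∀ best,
      ((∃ m, ts.foldl (fun b t => go eIdx (perm ++ [t.2.1]) (t.1 ++ t.2.2) b) best = some m) ∨
        (ts = [] ∧ ts.foldl (fun b t => go eIdx (perm ++ [t.2.1]) (t.1 ++ t.2.2) b) best = best)) ∧
      (ts.foldl (fun b t => go eIdx (perm ++ [t.2.1]) (t.1 ++ t.2.2) b) best = best ∨
        ∃ m, ts.foldl (fun b t => go eIdx (perm ++ [t.2.1]) (t.1 ++ t.2.2) b) best = some m ∧
          ∃ t ∈ ts, ∃ p, p.Perm (t.1 ++ t.2.2) ∧ m = gv eIdx (perm ++ t.2.1 :: p)) ∧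
      (∀ t ∈ ts, ∀ p, p.Perm (t.1 ++ t.2.2) → ∀ m,
        ts.foldl (fun b t => go eIdx (perm ++ [t.2.1]) (t.1 ++ t.2.2) b) best = some m →
        lexLt (gv eIdx (perm ++ t.2.1 :: p)) m = false) ∧
      (∀ b, best = some b → ∀ m,
        ts.foldl (fun b t => go eIdx (perm ++ [t.2.1]) (t.1 ++ t.2.2) b) best = some m →
        lexLt b m = false) := by
  induction ts with
  | nil =>
    intro best
    refine ⟨Or.inr ⟨rfl, rfl⟩, Or.inl rfl, by simp, ?_⟩
    rintro b rfl m hm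
    cases hm
    exact lexLt_irrefl b
  | cons t ts ih =>
    intro best
    have htn : (t.1 ++ t.2.2).length ≤ n := hts t List.mem_cons_self
    obtain ⟨m0, hgo, horig, hmin0, hb0⟩ := IH (t.1 ++ t.2.2) (perm ++ [t.2.1]) best htn
    have hfold : (t :: ts).foldl (fun b t => go eIdx (perm ++ [t.2.1]) (t.1 ++ t.2.2) b) best
        = ts.foldl (fun b t => go eIdx (perm ++ [t.2.1]) (t.1 ++ t.2.2) b) (some m0) := by
      rw [List.foldl_cons, hgo]
    obtain ⟨ih0, ih1, ih2, ih3⟩ := ih (fun t' ht' => hts t' (List.mem_cons_of_mem _ ht')) (some m0)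
    have hsome : ∃ m, (t :: ts).foldl
        (fun b t => go eIdx (perm ++ [t.2.1]) (t.1 ++ t.2.2) b) best = some m := by
      rcases ih0 with ⟨m, hm⟩ | ⟨_, hm⟩
      · exact ⟨m, by rw [hfold, hm]⟩
      · exact ⟨m0, by rw [hfold, hm]⟩
    have horig' : ∀ m, (t :: ts).foldl
        (fun b t => go eIdx (perm ++ [t.2.1]) (t.1 ++ t.2.2) b) best = some m →
        lexLt m0 m = false := by
      intro m hm
      rw [hfold] at hm
      exact ih3 m0 rfl m hm
    refine ⟨Or.inl hsome, ?_, ?_, ?_⟩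
    · -- origin
      rcases ih1 with he | ⟨m, hm, t', ht', p, hp, hgv⟩
      · -- fold over ts left (some m0) unchanged
        rcases horig with ⟨p, hp, hgv⟩ | rfl
        · refine Or.inr ⟨m0, by rw [hfold, he], t, List.mem_cons_self, p, hp, ?_⟩
          rw [hgv]
          congr 1
          simp
        · exact Or.inl (by rw [hfold, he])
      · exact Or.inr ⟨m, by rw [hfold, hm], t', List.mem_cons_of_mem _ ht', p, hp, hgv⟩
    · -- minimality over all branches
      intro t' ht' p hp m hm
      have hm0m : lexLt m0 m = false := horig' m hm
      rcases List.mem_cons.mp ht' with rfl | ht'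
      · have := hmin0 p hp
        rw [← List.append_cons] at this
        exact lexLt_neg_trans hm0m this
      · rw [hfold] at hm
        exact ih2 t' ht' p hp m hm
    · rintro b rfl m hm
      exact lexLt_neg_trans (horig' m hm) (hb0 b rfl)

theorem go_spec (eIdx : List (Int × Int)) :
    ∀ (N : Nat) (remaining perm : List Int) (best : Option (List (Int × Int))),
      remaining.length ≤ N →
      ∃ m, go eIdx perm remaining best = some m ∧
        ((∃ p, p.Perm remaining ∧ m = gv eIdx (perm ++ p)) ∨ best = some m) ∧
        (∀ p, p.Perm remaining → lexLt (gv eIdx (perm ++ p)) m = false) ∧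
        (∀ b, best = some b → lexLt b m = false) := by
  intro N
  induction N with
  | zero =>
    intro remaining perm best h
    have hr : remaining = [] := List.eq_nil_of_length_eq_zero (Nat.le_zero.mp h)
    subst hr
    exact go_nil_spec eIdx perm best
  | succ N ihN =>
    intro remaining perm best h
    cases remaining with
    | nil => exact go_nil_spec eIdx perm best
    | cons x xs =>
      have hts : ∀ t ∈ splits (x :: xs), (t.1 ++ t.2.2).length ≤ N := by
        intro t ht
        have := splits_length ht
        simp only [List.length_append] at this ⊢
        simp only [List.length_cons] at this h
        omega
      obtain ⟨h0, h1, h2, h3⟩ := go_fold_spec eIdx perm N ihN (splits (x :: xs)) hts best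
      have hne : splits (x :: xs) ≠ [] := by simp [splits]
      rcases h0 with ⟨m, hm⟩ | ⟨he, _⟩
      · refine ⟨m, by rw [go_cons_eq]; exact hm, ?_, ?_, ?_⟩
        · rcases h1 with he | ⟨m', hm', t, ht, p, hp, hgv⟩
          · rw [he] at hm
            exact Or.inr hm
          · rw [hm'] at hm
            cases hm
            exact Or.inl ⟨t.2.1 :: p, cons_perm_iff_splits.mpr ⟨t, ht, rfl, hp⟩, hgv⟩
        · intro q hq
          cases q with
          | nil => simpa using hq.length_eq
          | cons z q' =>
            obtain ⟨t, ht, rfl, hq'⟩ := cons_perm_iff_splits.mp hq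
            exact h2 t ht q' hq' m hm
        · intro b hb
          exact h3 b hb m hm
      · exact absurd he hne

-- proof-side names for the two value pipelines (definitionally equal to the ports' bodies)
def mapA (qubits vs : List Int) : PySem.Dict Int Int :=
  (qubits.zip vs).foldl (fun d p => d.insert p.1 p.2) PySem.Dict.empty

def fA (qubits : List Int) (es : List (Int × Int)) (vs : List Int) : List (Int × Int) :=
  PySem.List.sorted2 (es.map (fun e =>
    pairMin (((mapA qubits vs).get? e.1).getD 0) (((mapA qubits vs).get? e.2).getD 0)))
    (fun x => x.1) (fun x => x.2)

def idxD (qubits : List Int) : PySem.Dict Int Int :=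
  (PySem.List.enumerate qubits).foldl (fun d p => d.insert p.2 p.1) PySem.Dict.empty

def eIdxOf (qubits : List Int) (es : List (Int × Int)) : List (Int × Int) :=
  es.map (fun e => (((idxD qubits).get? e.1).getD 0, ((idxD qubits).get? e.2).getD 0))

theorem relabel_eq (qubits : List Int) (es : List (Int × Int)) (vs : List Int)
    (hlen : qubits.length = vs.length)
    (hpre : ∀ e ∈ es, e.1 ∈ qubits ∧ e.2 ∈ qubits) :
    fA qubits es vs = gv (eIdxOf qubits es) vs := by
  unfold fA gv eIdxOf
  rw [List.map_map]
  congr 1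
  apply List.map_congr_left
  intro e he
  obtain ⟨h1, h2⟩ := hpre e he
  have l1 := lookup_eq qubits vs hlen e.1 h1
  have l2 := lookup_eq qubits vs hlen e.2 h2
  unfold mapA idxD
  simp only [Function.comp]
  rw [l1, l2]

theorem foldl_stepg_some {α : Type} (g : α → List (Int × Int)) (l : List α)
    (x : List (Int × Int)) : ∃ y, l.foldl (fun b v => step b (g v)) (some x) = some y := by
  induction l generalizing x with
  | nil => exact ⟨x, rfl⟩
  | cons v l ih =>
    obtain ⟨m0, hs, _⟩ := step_spec (some x) (g v)
    obtain ⟨y, hy⟩ := ih m0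
    exact ⟨y, by rw [List.foldl_cons, hs, hy]⟩

-- ===== VERDICT (by name: the statement is the Claim_ definition above) =====
theorem get_canonical_form_spec : Claim_equal_get_canonical_form := by
  unfold Claim_equal_get_canonical_form
  intro qs es _ hpre
  unfold Spec_get_canonical_form
  show PySem.Set.ofList
      (((PySem.List.permutations
            (PySem.List.pyRange 0 ((PySem.List.sorted qs (fun x => x)).length : Int) 1)
            (PySem.List.sorted qs (fun x => x)).length).foldl
          (fun b p => step b (fA (PySem.List.sorted qs (fun x => x)) es p)) none).getD [])
    = PySem.Set.ofList
      ((go (eIdxOf (PySem.List.sorted qs (fun x => x)) es) []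
          (PySem.List.pyRange 0 ((PySem.List.sorted qs (fun x => x)).length : Int) 1)
          none).getD [])
  set Q := PySem.List.sorted qs (fun x => x) with hQ
  set R := PySem.List.pyRange 0 (Q.length : Int) 1 with hR
  have hRlen : R.length = Q.length := by
    rw [hR, PySem.List.length_pyRange_one]
    omega
  have hpre' : ∀ e ∈ es, e.1 ∈ Q ∧ e.2 ∈ Q := by
    intro e he
    obtain ⟨ha, hb⟩ := hpre e he
    exact ⟨(PySem.List.mem_sorted qs (fun x => x) false e.1).mpr ha, (PySem.List.mem_sorted qs (fun x => x) false e.2).mpr hb⟩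
  -- A's fold returns some value mA
  obtain ⟨mA, hmA⟩ : ∃ m, (PySem.List.permutations R Q.length).foldl
      (fun b p => step b (fA Q es p)) none = some m := by
    have hmem : R ∈ PySem.List.permutations R R.length := perms_complete (List.Perm.refl R)
    rw [hRlen] at hmem
    rcases hl : PySem.List.permutations R Q.length with _ | ⟨v, l⟩
    · rw [hl] at hmem; simp at hmem
    · obtain ⟨m0, hs, _⟩ := step_spec none (fA Q es v)
      obtain ⟨y, hy⟩ := foldl_stepg_some (fA Q es) l m0
      exact ⟨y, by rw [List.foldl_cons, hs, hy]⟩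
  have hmapA : ((PySem.List.permutations R Q.length).map (fA Q es)).foldl step none = some mA := by
    rw [List.foldl_map]
    exact hmA
  obtain ⟨hA1, hA2, _⟩ :=
    foldl_step_spec ((PySem.List.permutations R Q.length).map (fA Q es)) none
  -- B's recursion returns some value mB, attained by a permutation of R
  obtain ⟨mB, hgo, horigB, hminB, _⟩ := go_spec (eIdxOf Q es) R.length R [] none le_rfl
  have horigB' : ∃ p, p.Perm R ∧ mB = gv (eIdxOf Q es) p := by
    rcases horigB with ⟨p, hp, hgv⟩ | h
    · exact ⟨p, hp, by simpa using hgv⟩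
    · cases h
  -- mA is attained by some permutation pA of R
  obtain ⟨pA, hpAmem, hfa⟩ : ∃ p ∈ PySem.List.permutations R Q.length, fA Q es p = mA := by
    rcases hA1 with h | ⟨m, hmem, heq⟩
    · rw [hmapA] at h; cases h
    · rw [hmapA] at heq
      cases heq
      exact List.mem_map.mp hmem
  have hpA : pA.Perm R := by
    rw [← hRlen] at hpAmem
    exact PySem.List.perm_of_mem_permutations hpAmem
  have hlenA : Q.length = pA.length := by rw [hpA.length_eq, hRlen]
  -- lexLt mA mB = false
  have h1 : lexLt mA mB = false := by
    have := hminB pA hpA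
    rw [List.nil_append, ← relabel_eq Q es pA hlenA hpre', hfa] at this
    exact this
  -- lexLt mB mA = false
  have h2 : lexLt mB mA = false := by
    obtain ⟨pB, hpB, hmBv⟩ := horigB'
    have hmemB : pB ∈ PySem.List.permutations R Q.length := by
      rw [← hRlen]
      exact perms_complete hpB
    have hlenB : Q.length = pB.length := by rw [hpB.length_eq, hRlen]
    have := hA2 (fA Q es pB) (List.mem_map_of_mem hmemB) mA hmapA
    rw [relabel_eq Q es pB hlenB hpre', ← hmBv] at this
    exact this
  have hAB : mA = mB := lexLt_conn h1 h2
  rw [hmA, hgo, hAB]
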